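-- pv_equiv track=rewrite | github.com/HamanakaKeigo/analysis-feature | src/pic_feature.py | NgramLoc
-- ===== SOURCE A (Python) =====
-- def NgramLoc(sample,n):
--     index=0
--     bit=0
--     for i in range(0,n):
--         if sample[i]>0:
--             bit = 1
--         else:
--             bit = 0
--         index = index + bit*( 2**(n-i-1) )
--
--     return index
-- ===== SOURCE B (Python) =====
-- def NgramLoc(sample, n):
--     if n <= 0:
--         return 0
--     s = ''.join('1' if sample[i] > 0 else '0' for i in range(n))
--     return int(s, 2)
-- ===== Notes on version B (the rewrite author's own statement) =====
-- stated objective: idiomatic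
-- what changed: Builds the sign pattern as a binary string and lets int(s, 2) compute the value, replacing A's explicit bit*2**(n-i-1) accumulation loop.
import Mathlib
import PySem

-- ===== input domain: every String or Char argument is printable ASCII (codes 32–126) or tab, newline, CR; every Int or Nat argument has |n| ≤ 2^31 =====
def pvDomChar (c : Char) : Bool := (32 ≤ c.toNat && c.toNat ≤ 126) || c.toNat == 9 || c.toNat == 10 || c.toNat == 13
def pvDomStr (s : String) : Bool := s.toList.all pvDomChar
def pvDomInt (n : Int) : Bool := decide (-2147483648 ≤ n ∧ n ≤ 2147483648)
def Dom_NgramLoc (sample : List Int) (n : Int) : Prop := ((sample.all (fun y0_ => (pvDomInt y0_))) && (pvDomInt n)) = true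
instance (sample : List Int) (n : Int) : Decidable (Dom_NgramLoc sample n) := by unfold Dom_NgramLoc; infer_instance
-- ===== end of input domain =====

-- B builds the sign pattern as a binary string and parses it (int(s,2) as a Horner fold),
-- replacing A's explicit bit*2**(n-i-1) accumulation; objective: idiomatic.


-- ===== PORT A =====
-- state: (index, bit); sample[i] via pyGetD (in range under Pre_); 2**(n-i-1) with n-i-1 ≥ 0 in the loop
def NgramLoc (sample : List Int) (n : Int) : Int :=
  ((PySem.List.pyRange 0 n 1).foldl
    (fun (st : Int × Int) i =>
      let bit : Int := if PySem.List.pyGetD sample i 0 > 0 then 1 else 0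
      (st.1 + bit * 2 ^ (n - i - 1).toNat, bit))
    (0, 0)).1

-- ===== PORT B =====
-- the binary string over the first n elements, then int(s, 2) ported by hand as the standard
-- base-2 parse (exact here: the string consists only of '0'/'1' characters)
def NgramLoc_alt (sample : List Int) (n : Int) : Int :=
  if n ≤ 0 then 0
  else
    let s : List Char :=
      (PySem.List.pyRange 0 n 1).map
        (fun i => if PySem.List.pyGetD sample i 0 > 0 then '1' else '0')
    s.foldl (fun a c => a * 2 + (if c = '1' then 1 else 0)) 0

-- ===== PRECONDITION & SPEC =====
-- Python A raises IndexError when n > len(sample) (the loop reads sample[i] for i < n)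
def Pre_NgramLoc (sample : List Int) (n : Int) : Prop := n ≤ (sample.length : Int)
instance (sample : List Int) (n : Int) : Decidable (Pre_NgramLoc sample n) := by unfold Pre_NgramLoc; infer_instance
def pvWitness_NgramLoc : List Int × Int := ([3, -1, 2], 3)

def Spec_NgramLoc (sample : List Int) (n : Int) (out : Int) : Prop := out = NgramLoc_alt sample n
instance (sample : List Int) (n : Int) (out : Int) : Decidable (Spec_NgramLoc sample n out) := by unfold Spec_NgramLoc; infer_instance

-- ===== CLAIM (what is proved, stated in full; the proofs are below) =====
def Claim_equal_NgramLoc : Prop := ∀ (sample : List Int) (n : Int), Dom_NgramLoc sample n → Pre_NgramLoc sample n → Spec_NgramLoc sample n (NgramLoc sample n)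

-- ===== LEMMAS AND PROOFS =====

-- the sign bit of sample[i]
def pvBit (sample : List Int) (i : Int) : Int :=
  if PySem.List.pyGetD sample i 0 > 0 then 1 else 0

-- A's pair-fold first component is the sum of the contributions
theorem pvFstFold (sample : List Int) (n : Int) (l : List Int) (a b : Int) :
    ((l.foldl
      (fun (st : Int × Int) i =>
        let bit : Int := if PySem.List.pyGetD sample i 0 > 0 then 1 else 0
        (st.1 + bit * 2 ^ (n - i - 1).toNat, bit))
      (a, b)).1)
    = a + (l.map (fun i => pvBit sample i * 2 ^ (n - i - 1).toNat)).sum := by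
  induction l generalizing a b with
  | nil => simp
  | cons x xs ih =>
    simp only [List.foldl_cons, List.map_cons, List.sum_cons, ih, pvBit]
    ring

-- B's Horner fold with initial accumulator a
theorem pvHorner (sample : List Int) (l : List Int) (a : Int) :
    ((l.map (fun i => if PySem.List.pyGetD sample i 0 > 0 then '1' else '0')).foldl
        (fun a c => a * 2 + (if c = '1' then 1 else 0)) a)
    = (l.foldl (fun a i => a * 2 + pvBit sample i) a) := by
  induction l generalizing a with
  | nil => rfl
  | cons x xs ih =>
    simp only [List.map_cons, List.foldl_cons, ih, pvBit]
    by_cases h : PySem.List.pyGetD sample x 0 > 0 <;> simp [h]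

-- the common value: both sides equal this sum, for n = (m : Nat)
theorem pvSumEq (sample : List Int) (m : Nat) :
    ((PySem.List.pyRange 0 m 1).foldl (fun a i => a * 2 + pvBit sample i) 0)
    = ((PySem.List.pyRange 0 m 1).map
        (fun i => pvBit sample i * 2 ^ ((m : Int) - i - 1).toNat)).sum := by
  induction m with
  | zero => simp
  | succ k ih =>
    have hsplit : PySem.List.pyRange 0 ((k : Int) + 1) 1
        = PySem.List.pyRange 0 (k : Int) 1 ++ [(k : Int)] :=
      PySem.List.pyRange_one_succ_right (by exact_mod_cast Nat.zero_le k)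
    push_cast
    rw [hsplit, List.foldl_append, List.map_append, List.sum_append, ih]
    simp only [List.foldl_cons, List.foldl_nil, List.map_cons, List.map_nil, List.sum_cons,
      List.sum_nil]
    have hexp : ∀ i ∈ PySem.List.pyRange 0 (k : Int) 1,
        pvBit sample i * 2 ^ ((k : Int) + 1 - i - 1).toNat
        = (pvBit sample i * 2 ^ ((k : Int) - i - 1).toNat) * 2 := by
      intro i hi
      rw [PySem.List.mem_pyRange_one] at hi
      have h1 : ((k : Int) + 1 - i - 1).toNat = ((k : Int) - i - 1).toNat + 1 := by omega
      rw [h1, pow_succ]; ring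
    rw [List.map_congr_left hexp]
    have : ∀ (l : List Int), (l.map (fun i => (pvBit sample i * 2 ^ ((k : Int) - i - 1).toNat) * 2)).sum
        = (l.map (fun i => pvBit sample i * 2 ^ ((k : Int) - i - 1).toNat)).sum * 2 := by
      intro l; induction l with
      | nil => simp
      | cons y ys ihy =>
        simp only [List.map_cons, List.sum_cons, ihy]
        ring
    rw [this]
    have hlast : ((k : Int) + 1 - (k : Int) - 1).toNat = 0 := by omega
    rw [hlast]
    ring

-- ===== VERDICT (by name: the statement is the Claim_ definition above) =====
theorem NgramLoc_spec : Claim_equal_NgramLoc := by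
  intro sample n _ _
  unfold Spec_NgramLoc NgramLoc NgramLoc_alt
  by_cases hn : n ≤ 0
  · simp [hn, PySem.List.pyRange_one_eq_nil hn]
  · simp only [hn, if_false]
    have hm : n = ((n.toNat : Nat) : Int) := by omega
    rw [pvFstFold, pvHorner, hm, pvSumEq]
    simp
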